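-- pv_equiv track=rewrite | github.com/ab14jain/GrowTogether | Assignment Code/ShaggyAndDistances.py | solve
-- ===== SOURCE A (Python) =====
-- from collections import defaultdict
--
-- def solve(A):
--
--     h_map = defaultdict(int)
--     n = len(A)
--     min_distant = float('inf')
--     for i in range(n):
--         if A[i] in h_map:
--             min_distant = min(min_distant, i - h_map[A[i]])
--
--         h_map[A[i]] = i
--
--     if min_distant == float('inf'):
--         return -1
--
--     return min_distant
-- ===== SOURCE B (Python) =====
-- from collections import defaultdict
--
-- def solve(A):
--     # Two-pass: group positions by value, then min over consecutive gaps per group.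
--     groups = defaultdict(list)
--     for i, v in enumerate(A):
--         groups[v].append(i)
--     best = None
--     for idxs in groups.values():
--         for x, y in zip(idxs, idxs[1:]):
--             if best is None or y - x < best:
--                 best = y - x
--     return -1 if best is None else best
-- ===== Notes on version B (the rewrite author's own statement) =====
-- stated objective: alternative
-- what changed: A finds the minimum gap in one interleaved pass that keeps only the last-seen index per value; B is a two-pass decomposition that first groups all positions by value in a dict of lists and then minimises over consecutive differences within each group.
import Mathlib
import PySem

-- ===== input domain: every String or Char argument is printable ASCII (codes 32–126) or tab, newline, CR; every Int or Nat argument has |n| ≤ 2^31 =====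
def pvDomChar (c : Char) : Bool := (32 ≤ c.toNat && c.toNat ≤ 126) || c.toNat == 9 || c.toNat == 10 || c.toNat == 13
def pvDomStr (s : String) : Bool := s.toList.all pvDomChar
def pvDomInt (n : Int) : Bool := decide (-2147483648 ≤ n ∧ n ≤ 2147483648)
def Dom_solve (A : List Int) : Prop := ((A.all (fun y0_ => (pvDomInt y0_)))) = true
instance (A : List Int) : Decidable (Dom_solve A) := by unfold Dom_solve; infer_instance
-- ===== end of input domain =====

-- B replaces A's single pass over last-seen indices by a two-pass decomposition (group the
-- positions of each value, then minimise over consecutive gaps per group); same O(n) cost.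

-- ===== PORT A =====
-- Literal port of A: `for i in range(n)` with `A[i]`; `float('inf')` sentinel is `none`
-- (it only ever compares/holds ints, so Option Int is exact); i ∈ range(n) so A[i] = pyGetD A i 0.
def solve (A : List Int) : Int :=
  let n : Int := PySem.List.len A
  let st :=
    (PySem.List.pyRange 0 n 1).foldl
      (fun (st : PySem.Dict Int Int × Option Int) i =>
        let v := PySem.List.pyGetD A i 0
        let m := if st.1.contains v then
                   let g := i - st.1.getD v 0
                   some (match st.2 with | none => g | some d => min d g)
                 else st.2
        (st.1.insert v i, m))
      (PySem.Dict.empty, none)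
  match st.2 with
  | none => -1
  | some d => d

-- ===== PORT B =====
-- Literal port of Source B: group positions by value with a dict of lists, then scan each group's
-- consecutive pairs (idxs[1:] = drop 1, exact for this nonnegative slice); `best = None` is `none`.
def solve_alt (A : List Int) : Int :=
  let groups :=
    (PySem.List.enumerate A).foldl
      (fun (d : PySem.Dict Int (List Int)) p => d.modify p.2 [] (fun l => l ++ [p.1]))
      PySem.Dict.empty
  let best :=
    groups.values.foldl
      (fun b idxs =>
        (idxs.zip (idxs.drop 1)).foldl
          (fun (b : Option Int) xy =>
            match b with
            | none => some (xy.2 - xy.1)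
            | some m => if xy.2 - xy.1 < m then some (xy.2 - xy.1) else some m)
          b)
      none
  match best with
  | none => -1
  | some m => m

-- ===== PRECONDITION & SPEC =====
def Spec_solve (A : List Int) (out : Int) : Prop := out = solve_alt A
instance (A : List Int) (out : Int) : Decidable (Spec_solve A out) := by unfold Spec_solve; infer_instance

-- ===== CLAIM (what is proved, stated in full; the proofs are below) =====
def Claim_equal_solve : Prop := ∀ (A : List Int), Dom_solve A → Spec_solve A (solve A)

-- ===== LEMMAS AND PROOFS =====

-- A's loop step, on an (index, value) pair
def pvStep (st : PySem.Dict Int Int × Option Int) (p : Int × Int) : PySem.Dict Int Int × Option Int :=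
  (st.1.insert p.2 p.1,
   if st.1.contains p.2 then
     some (match st.2 with | none => p.1 - st.1.getD p.2 0 | some d => min d (p.1 - st.1.getD p.2 0))
   else st.2)

-- running minimum over Option Int (none = +inf)
def pvOminF (b : Option Int) (g : Int) : Option Int :=
  some (match b with | none => g | some d => min d g)

def pvOmin (l : List Int) : Option Int := l.foldl pvOminF none

-- positions at which v occurs in P
def pvPos (P : List Int) (v : Int) : List Int :=
  ((PySem.List.enumerate P).filter (fun p => p.2 == v)).map (fun p => p.1)

def pvDiffs (l : List Int) : List Int := (l.zip (l.drop 1)).map (fun p => p.2 - p.1)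

-- all gaps between consecutive equal elements, grouped by value
def pvGaps (P : List Int) : List Int :=
  (PySem.List.dedup P).flatMap (fun v => pvDiffs (pvPos P v))

lemma pvOminF_rightComm : ∀ (b : Option Int) (g g' : Int),
    pvOminF (pvOminF b g) g' = pvOminF (pvOminF b g') g := by
  intro b g g'
  cases b <;> simp [pvOminF, Int.min_def] <;> split_ifs <;> omega

lemma pvOmin_perm {l l' : List Int} (h : l.Perm l') : pvOmin l = pvOmin l' :=
  List.Perm.foldl_eq (rcomm := ⟨fun b g g' => pvOminF_rightComm b g g'⟩) h none

lemma pvOmin_concat (l : List Int) (g : Int) : pvOmin (l ++ [g]) = pvOminF (pvOmin l) g := by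
  simp [pvOmin, List.foldl_append]

lemma pvPos_append (P : List Int) (x v : Int) :
    pvPos (P ++ [x]) v = pvPos P v ++ (if x = v then [(P.length : Int)] else []) := by
  by_cases hx : x = v <;>
    simp [pvPos, PySem.List.enumerate_append, PySem.List.enumerate_cons,
      PySem.List.enumerate_nil, hx]

lemma pvPos_eq_nil_iff (P : List Int) (v : Int) : pvPos P v = [] ↔ v ∉ P := by
  simp [pvPos, List.filter_eq_nil_iff, List.mem_iff_getElem, PySem.List.getElem_enumerate,
    Prod.ext_iff]
  constructor
  · intro h k hk
    exact h _ _ k rfl hk rfl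
  · rintro h a b k rfl hk rfl
    exact h k hk

lemma pvDedup_append (P : List Int) (x : Int) :
    PySem.List.dedup (P ++ [x]) =
      if x ∈ P then PySem.List.dedup P else PySem.List.dedup P ++ [x] := by
  by_cases hx : x ∈ P <;>
    simp [PySem.List.dedup_eq_ofList, PySem.Set.ofList_append, PySem.Set.update_cons,
      PySem.Set.update_nil, PySem.Set.add, PySem.Set.contains, PySem.Set.mem_ofList, hx]

lemma pvDiffs_concat (l : List Int) (a : Int) (h : l ≠ []) :
    pvDiffs (l ++ [a]) = pvDiffs l ++ [a - l.getLast h] := by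
  induction l with
  | nil => exact absurd rfl h
  | cons b l ih =>
    cases l with
    | nil => simp [pvDiffs]
    | cons c l' =>
      have h2 : pvDiffs (b :: c :: l' ++ [a]) = (c - b) :: pvDiffs (c :: l' ++ [a]) := rfl
      have h3 : pvDiffs (b :: c :: l') = (c - b) :: pvDiffs (c :: l') := rfl
      rw [show b :: c :: l' ++ [a] = b :: (c :: l' ++ [a]) from rfl] at *
      rw [h2, ih (by simp), h3]
      simp [List.getLast_cons]

lemma pvGaps_append (P : List Int) (x : Int) :
    (pvGaps (P ++ [x])).Perm
      (pvGaps P ++ (if h : x ∈ P then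
        [(P.length : Int) - (pvPos P x).getLast (by
          intro hn; exact (pvPos_eq_nil_iff P x).mp hn h)] else [])) := by
  have hcong : ∀ (L : List Int), x ∉ L →
      L.flatMap (fun v => pvDiffs (pvPos (P ++ [x]) v))
        = L.flatMap (fun v => pvDiffs (pvPos P v)) := by
    intro L hL
    simp only [List.flatMap_def]
    congr 1
    refine List.map_congr_left (fun v hv => ?_)
    rw [pvPos_append, if_neg (fun h => hL (by rwa [h])), List.append_nil]
  by_cases hx : x ∈ P
  · rw [dif_pos hx]
    have hne : pvPos P x ≠ [] := fun hn => (pvPos_eq_nil_iff P x).mp hn hx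
    have hd := pvDedup_append P x
    rw [if_pos hx] at hd
    have hxd : x ∈ PySem.List.dedup P := by
      simpa [PySem.List.mem_dedup] using hx
    obtain ⟨L1, L2, hsplit⟩ := List.append_of_mem hxd
    have hnd : (PySem.List.dedup P).Nodup := by
      rw [PySem.List.dedup_eq_ofList]; exact PySem.Set.nodup_ofList P
    rw [hsplit] at hnd
    have hx1 : x ∉ L1 := fun hm =>
      (List.nodup_append.mp hnd).2.2 x hm x List.mem_cons_self rfl
    have hx2 : x ∉ L2 := by
      have := (List.nodup_append.mp hnd).2.1
      exact (List.nodup_cons.mp this).1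
    have hfx : pvDiffs (pvPos (P ++ [x]) x)
        = pvDiffs (pvPos P x) ++ [(P.length : Int) - (pvPos P x).getLast hne] := by
      rw [pvPos_append, if_pos rfl, pvDiffs_concat _ _ hne]
    unfold pvGaps
    rw [hd, hsplit, List.flatMap_append, List.flatMap_append,
      List.flatMap_cons, List.flatMap_cons, hcong L1 hx1, hcong L2 hx2, hfx]
    have hmid : ((pvDiffs (pvPos P x)
          ++ [(P.length : Int) - (pvPos P x).getLast hne])
          ++ L2.flatMap (fun v => pvDiffs (pvPos P v))).Perm
        ((pvDiffs (pvPos P x) ++ L2.flatMap (fun v => pvDiffs (pvPos P v)))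
          ++ [(P.length : Int) - (pvPos P x).getLast hne]) := by
      rw [List.append_assoc, List.append_assoc]
      exact (List.perm_append_comm).append_left _
    simpa [List.append_assoc] using hmid.append_left (L1.flatMap (fun v => pvDiffs (pvPos P v)))
  · rw [dif_neg hx]
    apply List.Perm.of_eq
    unfold pvGaps
    rw [pvDedup_append, if_neg hx, List.flatMap_append, List.append_nil, hcong _ ?notmem]
    case notmem => simpa [PySem.List.mem_dedup] using hx
    have hfx : pvDiffs (pvPos (P ++ [x]) x) = [] := by
      rw [pvPos_append, if_pos rfl, (pvPos_eq_nil_iff P x).mpr hx]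
      rfl
    simp [hfx]

lemma pvFoldA_spec (P : List Int) :
    (∀ v, ((PySem.List.enumerate P).foldl pvStep (PySem.Dict.empty, none)).1.get? v
            = (pvPos P v).getLast?)
    ∧ ((PySem.List.enumerate P).foldl pvStep (PySem.Dict.empty, none)).2 = pvOmin (pvGaps P) := by
  induction P using List.reverseRecOn with
  | nil =>
    refine ⟨fun v => ?_, ?_⟩
    · simp [PySem.List.enumerate_nil, PySem.Dict.get?_empty, pvPos,
        PySem.List.enumerate_nil]
    · simp [PySem.List.enumerate_nil, pvGaps, pvOmin, PySem.List.dedup_eq_ofList]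
  | append_singleton P x ih =>
    obtain ⟨ih1, ih2⟩ := ih
    have henum : PySem.List.enumerate (P ++ [x])
        = PySem.List.enumerate P ++ [((P.length : Int), x)] := by
      rw [PySem.List.enumerate_append]
      simp [PySem.List.enumerate_cons, PySem.List.enumerate_nil]
    rw [henum, List.foldl_append]
    set st := (PySem.List.enumerate P).foldl pvStep (PySem.Dict.empty, none) with hst
    refine ⟨fun v => ?_, ?_⟩
    · show (st.1.insert x (P.length : Int)).get? v = _
      rw [PySem.Dict.get?_insert, pvPos_append]
      by_cases hv : v = x
      · rw [if_pos hv, if_pos hv.symm, List.getLast?_concat]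
      · rw [if_neg hv, if_neg (fun h => hv h.symm), List.append_nil, ih1]
    · show (if st.1.contains x then
          some (match st.2 with
            | none => (P.length : Int) - st.1.getD x 0
            | some d => min d ((P.length : Int) - st.1.getD x 0))
          else st.2) = pvOmin (pvGaps (P ++ [x]))
      rw [pvOmin_perm (pvGaps_append P x)]
      by_cases hx : x ∈ P
      · have hne : pvPos P x ≠ [] := fun hn => (pvPos_eq_nil_iff P x).mp hn hx
        have hget : st.1.get? x = some ((pvPos P x).getLast hne) := by
          rw [ih1, List.getLast?_eq_some_getLast hne]
        have hcont : st.1.contains x = true := by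
          rw [PySem.Dict.contains_eq_isSome_get?, hget]
          rfl
        have hgetD : st.1.getD x 0 = (pvPos P x).getLast hne := by
          rw [PySem.Dict.getD_eq_get?_getD, hget]
          rfl
        rw [hcont, if_pos rfl, hgetD, ih2, dif_pos hx, pvOmin_concat]
        rfl
      · have hcont : st.1.contains x = false := by
          rw [PySem.Dict.contains_eq_isSome_get?, ih1,
            (pvPos_eq_nil_iff P x).mpr hx]
          rfl
        rw [hcont, if_neg (by simp), ih2, dif_neg hx, List.append_nil]

lemma solve_eq (A : List Int) :
    solve A = match pvOmin (pvGaps A) with | none => -1 | some d => d := by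
  have h : (PySem.List.pyRange 0 (PySem.List.len A) 1).foldl
      (fun (st : PySem.Dict Int Int × Option Int) i =>
        let v := PySem.List.pyGetD A i 0
        let m := if st.1.contains v then
                   let g := i - st.1.getD v 0
                   some (match st.2 with | none => g | some d => min d g)
                 else st.2
        (st.1.insert v i, m))
      (PySem.Dict.empty, none)
      = (PySem.List.enumerate A).foldl pvStep (PySem.Dict.empty, none) := by
    rw [PySem.List.enumerate_eq_map_pyRange A 0, List.foldl_map]
    rfl
  simp only [solve]
  rw [h, (pvFoldA_spec A).2]

lemma solve_alt_eq (A : List Int) :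
    solve_alt A = match pvOmin (pvGaps A) with | none => -1 | some d => d := by
  have hswap : (PySem.List.enumerate A).foldl
      (fun (d : PySem.Dict Int (List Int)) p => d.modify p.2 [] (fun l => l ++ [p.1]))
      PySem.Dict.empty
      = ((PySem.List.enumerate A).map Prod.swap).foldl
          (fun (d : PySem.Dict Int (List Int)) p => d.modify p.1 [] (fun l => l ++ [p.2]))
          PySem.Dict.empty := by
    rw [List.foldl_map]
    rfl
  have hgetD : ∀ v, ((PySem.List.enumerate A).foldl
      (fun (d : PySem.Dict Int (List Int)) p => d.modify p.2 [] (fun l => l ++ [p.1]))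
      PySem.Dict.empty).getD v [] = pvPos A v := by
    intro v
    rw [hswap, PySem.Dict.getD_foldl_modify_append]
    simp [PySem.Dict.getD_empty, List.filter_map, pvPos, Function.comp_def]
  have hkeys0 := PySem.Dict.keys_foldl_modify_key (PySem.List.enumerate A)
      (fun p => p.2) ([] : List Int) (fun _ p l => l ++ [p.1]) PySem.Dict.empty
  have hnd : ((PySem.List.enumerate A).foldl
      (fun (d : PySem.Dict Int (List Int)) p => d.modify p.2 [] (fun l => l ++ [p.1]))
      PySem.Dict.empty).keys.Nodup :=
    PySem.Dict.nodup_keys_foldl_modify_key (PySem.List.enumerate A)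
      (fun p => p.2) ([] : List Int) (fun _ p l => l ++ [p.1]) PySem.Dict.empty
      PySem.Dict.nodup_keys_empty
  have hkeys : ((PySem.List.enumerate A).foldl
      (fun (d : PySem.Dict Int (List Int)) p => d.modify p.2 [] (fun l => l ++ [p.1]))
      PySem.Dict.empty).keys = PySem.List.dedup A := by
    rw [hkeys0, PySem.Dict.keys_empty, PySem.Set.update_nil_left,
      PySem.List.map_snd_enumerate, PySem.List.dedup_eq_ofList]
  have hvals : ((PySem.List.enumerate A).foldl
      (fun (d : PySem.Dict Int (List Int)) p => d.modify p.2 [] (fun l => l ++ [p.1]))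
      PySem.Dict.empty).values = (PySem.List.dedup A).map (fun v => pvPos A v) := by
    rw [PySem.Dict.values_eq_map_keys _ hnd [], hkeys]
    exact List.map_congr_left (fun v _ => hgetD v)
  have hinnerfun : (fun (b : Option Int) (xy : Int × Int) =>
      match b with
      | none => some (xy.2 - xy.1)
      | some m => if xy.2 - xy.1 < m then some (xy.2 - xy.1) else some m)
      = fun b xy => pvOminF b (xy.2 - xy.1) := by
    funext b xy
    cases b with
    | none => rfl
    | some m =>
      simp only [pvOminF, Int.min_def]
      split_ifs <;> first | rfl | (exact congrArg some (by omega))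
  have hpv : pvOmin (pvGaps A) = (PySem.List.dedup A).foldl
      (fun b v => ((pvPos A v).zip ((pvPos A v).drop 1)).foldl
        (fun b xy => pvOminF b (xy.2 - xy.1)) b) none := by
    unfold pvOmin pvGaps
    rw [List.flatMap_def, List.foldl_flatten, List.foldl_map]
    congr 1
    funext b v
    rw [pvDiffs, List.foldl_map]
  simp only [solve_alt, hinnerfun]
  rw [hvals, List.foldl_map, hpv]

-- ===== VERDICT (by name: the statement is the Claim_ definition above) =====
theorem solve_spec : Claim_equal_solve := by
  intro A _
  unfold Spec_solve
  rw [solve_eq, solve_alt_eq]
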